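-- pv_equiv track=rewrite | github.com/itrin9634/Algorithm-Study | 프로그래머스/lv2/84512. 모음 사전/모음 사전.py | solution
-- ===== SOURCE A (Python) =====
-- def solution(word):
--     answer = 0
--     alpha = ['A', 'E', 'I', 'O', 'U']
--
--     for i in range(5):
--         answer += 1
--         fir = alpha[i]
--         if word == fir:
--             return answer
--         for j in range(5):
--             answer += 1
--             sec = fir + alpha[j]
--             if word == sec:
--                 return answer
--             for p in range(5):
--                 answer += 1
--                 thr = sec + alpha[p]
--                 if word == thr:
--                     return answer
--                 for q in range(5):
--                     answer += 1
--                     four = thr + alpha[q]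
--                     if word == four:
--                         return answer
--                     for r in range(5):
--                         answer += 1
--                         five = four + alpha[r]
--                         if word == five:
--                             return answer
-- ===== SOURCE B (Python) =====
-- def solution(word):
--     weights = [781, 156, 31, 6, 1]
--     vowels = 'AEIOU'
--     return sum(vowels.index(c) * weights[i] + 1 for i, c in enumerate(word))
-- ===== Notes on version B (the rewrite author's own statement) =====
-- stated objective: simpler
-- what changed: Replaces the quintuple nested loop that enumerates all 3905 vowel words until it hits the target with a one-line closed form: each character contributes index(c)*weight+1, where the weights [781,156,31,6,1] are the subtree sizes of the vowel dictionary.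
-- outside the precondition, e.g. on solution(''): A returns None, B returns 0; on solution('B'): A returns None, B raises ValueError
import Mathlib
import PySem

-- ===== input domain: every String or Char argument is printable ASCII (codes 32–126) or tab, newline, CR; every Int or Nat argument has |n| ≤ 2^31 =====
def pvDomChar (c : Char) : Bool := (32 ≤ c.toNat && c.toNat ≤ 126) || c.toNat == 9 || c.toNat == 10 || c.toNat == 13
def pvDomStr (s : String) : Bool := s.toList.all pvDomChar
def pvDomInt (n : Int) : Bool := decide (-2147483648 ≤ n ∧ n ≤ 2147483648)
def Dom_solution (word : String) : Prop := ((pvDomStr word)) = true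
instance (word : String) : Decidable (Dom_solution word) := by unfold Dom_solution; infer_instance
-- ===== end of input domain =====

-- B replaces A's quintuple nested enumeration of all 3905 vowel words with a closed-form
-- weighted sum over the characters (objective: simpler).

-- ===== PORT A =====
-- String concatenation and equality are ported on List Char (exact: same comparisons, same values).
def pvAlpha : List (List Char) := [['A'], ['E'], ['I'], ['O'], ['U']]
-- alpha[i] for i produced by range(5); the index is always in range, .getD [] is never taken
def pvAget (i : Int) : List Char := (PySem.List.pyGet? pvAlpha i).getD []

def pvLoop5 (w four : List Char) (st : Int × Option Int) : Int × Option Int :=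
  (PySem.List.pyRange 0 5 1).foldl (fun st r =>
    match st.2 with
    | some _ => st
    | none =>
      let answer := st.1 + 1
      let five := four ++ pvAget r
      if w == five then (answer, some answer) else (answer, none)) st

def pvLoop4 (w thr : List Char) (st : Int × Option Int) : Int × Option Int :=
  (PySem.List.pyRange 0 5 1).foldl (fun st q =>
    match st.2 with
    | some _ => st
    | none =>
      let answer := st.1 + 1
      let four := thr ++ pvAget q
      if w == four then (answer, some answer) else pvLoop5 w four (answer, none)) st

def pvLoop3 (w sec : List Char) (st : Int × Option Int) : Int × Option Int :=
  (PySem.List.pyRange 0 5 1).foldl (fun st p =>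
    match st.2 with
    | some _ => st
    | none =>
      let answer := st.1 + 1
      let thr := sec ++ pvAget p
      if w == thr then (answer, some answer) else pvLoop4 w thr (answer, none)) st

def pvLoop2 (w fir : List Char) (st : Int × Option Int) : Int × Option Int :=
  (PySem.List.pyRange 0 5 1).foldl (fun st j =>
    match st.2 with
    | some _ => st
    | none =>
      let answer := st.1 + 1
      let sec := fir ++ pvAget j
      if w == sec then (answer, some answer) else pvLoop3 w sec (answer, none)) st

def pvLoop1 (w : List Char) (st : Int × Option Int) : Int × Option Int :=
  (PySem.List.pyRange 0 5 1).foldl (fun st i =>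
    match st.2 with
    | some _ => st
    | none =>
      let answer := st.1 + 1
      let fir := ([] : List Char) ++ pvAget i
      if w == fir then (answer, some answer) else pvLoop2 w fir (answer, none)) st

-- Python falls through (returns None) on words outside Pre_; the port returns 0 there.
def solution (word : String) : Int :=
  ((pvLoop1 word.toList (0, none)).2).getD 0

-- ===== PORT B =====
def solution_alt (word : String) : Int :=
  let weights : List Int := [781, 156, 31, 6, 1]
  let vowels : List Char := ['A', 'E', 'I', 'O', 'U']
  (PySem.List.enumerate word.toList 0).foldl
    (fun acc ic =>
      acc + (((PySem.List.index? vowels ic.2).getD 0 : Int) * ((PySem.List.pyGet? weights ic.1).getD 0) + 1)) 0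

-- ===== PRECONDITION & SPEC =====
-- Pre_ excludes exactly the inputs on which A falls through and returns None (no Int):
-- the empty word, words longer than 5, and words containing a character other than the five vowels.
def Pre_solution (word : String) : Prop :=
  word.toList ≠ [] ∧ word.toList.length ≤ 5 ∧
  word.toList.all ((['A', 'E', 'I', 'O', 'U'] : List Char).contains ·) = true
instance (word : String) : Decidable (Pre_solution word) := by unfold Pre_solution; infer_instance

def pvWitness_solution : String := "EIO"

def Spec_solution (word : String) (out : Int) : Prop := out = solution_alt word
instance (word : String) (out : Int) : Decidable (Spec_solution word out) := by unfold Spec_solution; infer_instance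

-- ===== CLAIM (what is proved, stated in full; the proofs are below) =====
def Claim_equal_solution : Prop := ∀ (word : String), Dom_solution word → Pre_solution word → Spec_solution word (solution word)

-- ===== LEMMAS AND PROOFS =====

def pvVs : List Char := ['A', 'E', 'I', 'O', 'U']
def pvCi (c : Char) : Int := ((PySem.List.index? pvVs c).getD 0 : Nat)

def pvT : Nat → Int
  | 0 => 0
  | d + 1 => 5 * (pvT d + 1)

def pvWs : Nat → List Int
  | 0 => []
  | d + 1 => (pvT d + 1) :: pvWs d

def pvRkW : List Int → List Char → Int
  | _, [] => 0
  | [], _ :: _ => 0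
  | wgt :: ws, c :: rest => pvCi c * wgt + 1 + pvRkW ws rest

def pvGloop : Nat → List Char → List Char → Int × Option Int → Int × Option Int
  | 0, _, _, st => st
  | d + 1, w, pre, st =>
    (PySem.List.pyRange 0 5 1).foldl (fun st r =>
      match st.2 with
      | some _ => st
      | none =>
        let answer := st.1 + 1
        let nxt := pre ++ pvAget r
        if w == nxt then (answer, some answer) else pvGloop d w nxt (answer, none)) st

def pvValid (d : Nat) (s : List Char) : Prop :=
  1 ≤ s.length ∧ s.length ≤ d ∧ ∀ c ∈ s, c ∈ pvVs

theorem pvLoop1_eq (w : List Char) (st : Int × Option Int) : pvLoop1 w st = pvGloop 5 w [] st := rfl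

theorem pvExtend (d : Nat) (w pre : List Char) (c : Char) (hc : c ∈ pvVs)
    (h : ∀ s : List Char, pvValid (d + 1) s → w ≠ pre ++ s) :
    ∀ s : List Char, pvValid d s → w ≠ (pre ++ [c]) ++ s := by
  intro s hs heq
  exact h (c :: s) ⟨by simp, by simpa using Nat.succ_le_succ hs.2.1,
    by intro x hx; rcases List.mem_cons.mp hx with rfl | hx; exact hc; exact hs.2.2 x hx⟩
    (by simpa [List.append_assoc] using heq)

theorem pvSingleValid (d : Nat) (c : Char) (hc : c ∈ pvVs) : pvValid (d + 1) [c] :=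
  ⟨by simp, by simp, by intro x hx; simpa using List.mem_singleton.mp hx ▸ hc⟩

theorem pvRange5 : PySem.List.pyRange 0 5 1 = [0, 1, 2, 3, 4] := by decide

theorem pvGloop_none (d : Nat) (w : List Char) : ∀ (pre : List Char) (ans : Int),
    (∀ s : List Char, pvValid d s → w ≠ pre ++ s) →
    pvGloop d w pre (ans, none) = (ans + pvT d, none) := by
  induction d with
  | zero => intro pre ans h; simp [pvGloop, pvT]
  | succ d ih =>
    intro pre ans h
    have miss : ∀ c : Char, c ∈ pvVs → (w == pre ++ [c]) = false := by
      intro c hc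
      exact beq_eq_false_iff_ne.mpr (h [c] (pvSingleValid d c hc))
    have sub : ∀ (c : Char) (a : Int), c ∈ pvVs →
        pvGloop d w (pre ++ [c]) (a, none) = (a + pvT d, none) := by
      intro c a hc
      exact ih (pre ++ [c]) a (pvExtend d w pre c hc h)
    have hA : pvAget 0 = ['A'] := by decide
    have hE : pvAget 1 = ['E'] := by decide
    have hI : pvAget 2 = ['I'] := by decide
    have hO : pvAget 3 = ['O'] := by decide
    have hU : pvAget 4 = ['U'] := by decide
    have mA := miss 'A' (by decide); have mE := miss 'E' (by decide)
    have mI := miss 'I' (by decide); have mO := miss 'O' (by decide)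
    have mU := miss 'U' (by decide)
    have sA : ∀ a : Int, pvGloop d w (pre ++ ['A']) (a, none) = (a + pvT d, none) :=
      fun a => sub 'A' a (by decide)
    have sE : ∀ a : Int, pvGloop d w (pre ++ ['E']) (a, none) = (a + pvT d, none) :=
      fun a => sub 'E' a (by decide)
    have sI : ∀ a : Int, pvGloop d w (pre ++ ['I']) (a, none) = (a + pvT d, none) :=
      fun a => sub 'I' a (by decide)
    have sO : ∀ a : Int, pvGloop d w (pre ++ ['O']) (a, none) = (a + pvT d, none) :=
      fun a => sub 'O' a (by decide)
    have sU : ∀ a : Int, pvGloop d w (pre ++ ['U']) (a, none) = (a + pvT d, none) :=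
      fun a => sub 'U' a (by decide)
    simp only [pvGloop, pvRange5, List.foldl_cons, List.foldl_nil, hA, hE, hI, hO, hU,
      mA, mE, mI, mO, mU, Bool.false_eq_true, if_false, sA, sE, sI, sO, sU]
    rw [show pvT (d + 1) = 5 * (pvT d + 1) from rfl]
    simp only [Prod.mk.injEq]
    exact ⟨by omega, trivial⟩

theorem pvRkW_nil (ws : List Int) : pvRkW ws [] = 0 := by cases ws <;> rfl

theorem pvNeOne {w pre : List Char} {c : Char} {rest : List Char} (hw : w = pre ++ c :: rest)
    {x : Char} (hx : ¬(c = x ∧ rest = [])) : (w == pre ++ [x]) = false := by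
  apply beq_eq_false_iff_ne.mpr
  rw [hw]
  intro heq
  have h2 := List.append_cancel_left heq
  simp only [List.cons.injEq] at h2
  exact hx ⟨h2.1, h2.2⟩

theorem pvNoneDeep (d : Nat) {w pre : List Char} {c : Char} {rest : List Char}
    (hw : w = pre ++ c :: rest) {x : Char} (hx : x ≠ c) (ans : Int) :
    pvGloop d w (pre ++ [x]) (ans, none) = (ans + pvT d, none) := by
  apply pvGloop_none d w _ ans
  intro s hs heq
  rw [hw, List.append_assoc] at heq
  have h2 := List.append_cancel_left heq
  simp only [List.singleton_append, List.cons.injEq] at h2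
  exact hx h2.1.symm

theorem pvGloop_some (d : Nat) (w : List Char) : ∀ (pre : List Char) (ans : Int) (s : List Char),
    pvValid d s → w = pre ++ s →
    pvGloop d w pre (ans, none) = (ans + pvRkW (pvWs d) s, some (ans + pvRkW (pvWs d) s)) := by
  induction d with
  | zero =>
    intro pre ans s hs hw
    have h1 := hs.1
    have h2 := hs.2.1
    exact absurd (h1.trans h2) (by omega)
  | succ d ih =>
    intro pre ans s hs hw
    cases s with
    | nil => exact absurd hs.1 (by simp)
    | cons c rest =>
    have hA : pvAget 0 = ['A'] := by decide
    have hE : pvAget 1 = ['E'] := by decide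
    have hI : pvAget 2 = ['I'] := by decide
    have hO : pvAget 3 = ['O'] := by decide
    have hU : pvAget 4 = ['U'] := by decide
    have hc : c ∈ pvVs := hs.2.2 c (by simp)
    simp only [pvVs, List.mem_cons, List.mem_singleton, List.not_mem_nil, or_false] at hc
    rcases hc with rfl | rfl | rfl | rfl | rfl
    · -- c = 'A'
        cases rest with
        | nil =>
          have tc : (w == pre ++ ['A']) = true := beq_iff_eq.mpr (by rw [hw])
          simp only [pvGloop, pvRange5, List.foldl_cons, List.foldl_nil, hA, hE, hI, hO, hU, tc, Bool.false_eq_true, if_false, if_true]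
          rw [show pvRkW (pvWs (d + 1)) ['A'] = pvCi 'A' * (pvT d + 1) + 1 + pvRkW (pvWs d) [] from rfl, pvRkW_nil, show pvCi 'A' = 0 from by decide]
          simp only [Prod.mk.injEq]
          exact ⟨by ring, by rw [Option.some.injEq]; ring⟩
        | cons r1 rs =>
          have mc : (w == pre ++ ['A']) = false := pvNeOne hw (by simp)
          have hit : ∀ a : Int, pvGloop d w (pre ++ ['A']) (a, none) = (a + pvRkW (pvWs d) (r1 :: rs), some (a + pvRkW (pvWs d) (r1 :: rs))) := by
            intro a
            apply ih (pre ++ ['A']) a (r1 :: rs)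
              ⟨by simp, by have := hs.2.1; simp at this ⊢; omega,
               fun x hx => hs.2.2 x (by simp at hx ⊢; tauto)⟩
            rw [hw]; simp
          simp only [pvGloop, pvRange5, List.foldl_cons, List.foldl_nil, hA, hE, hI, hO, hU, mc, Bool.false_eq_true, if_false, hit]
          rw [show pvRkW (pvWs (d + 1)) ('A' :: r1 :: rs) = pvCi 'A' * (pvT d + 1) + 1 + pvRkW (pvWs d) (r1 :: rs) from rfl, show pvCi 'A' = 0 from by decide]
          simp only [Prod.mk.injEq]
          exact ⟨by ring, by rw [Option.some.injEq]; ring⟩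
    · -- c = 'E'
        have mA : (w == pre ++ ['A']) = false := pvNeOne hw (by simp)
        have nA : ∀ a : Int, pvGloop d w (pre ++ ['A']) (a, none) = (a + pvT d, none) := fun a => pvNoneDeep d hw (by decide) a
        cases rest with
        | nil =>
          have tc : (w == pre ++ ['E']) = true := beq_iff_eq.mpr (by rw [hw])
          simp only [pvGloop, pvRange5, List.foldl_cons, List.foldl_nil, hA, hE, hI, hO, hU, mA, nA, tc, Bool.false_eq_true, if_false, if_true]
          rw [show pvRkW (pvWs (d + 1)) ['E'] = pvCi 'E' * (pvT d + 1) + 1 + pvRkW (pvWs d) [] from rfl, pvRkW_nil, show pvCi 'E' = 1 from by decide]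
          simp only [Prod.mk.injEq]
          exact ⟨by ring, by rw [Option.some.injEq]; ring⟩
        | cons r1 rs =>
          have mc : (w == pre ++ ['E']) = false := pvNeOne hw (by simp)
          have hit : ∀ a : Int, pvGloop d w (pre ++ ['E']) (a, none) = (a + pvRkW (pvWs d) (r1 :: rs), some (a + pvRkW (pvWs d) (r1 :: rs))) := by
            intro a
            apply ih (pre ++ ['E']) a (r1 :: rs)
              ⟨by simp, by have := hs.2.1; simp at this ⊢; omega,
               fun x hx => hs.2.2 x (by simp at hx ⊢; tauto)⟩
            rw [hw]; simp
          simp only [pvGloop, pvRange5, List.foldl_cons, List.foldl_nil, hA, hE, hI, hO, hU, mA, nA, mc, Bool.false_eq_true, if_false, hit]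
          rw [show pvRkW (pvWs (d + 1)) ('E' :: r1 :: rs) = pvCi 'E' * (pvT d + 1) + 1 + pvRkW (pvWs d) (r1 :: rs) from rfl, show pvCi 'E' = 1 from by decide]
          simp only [Prod.mk.injEq]
          exact ⟨by ring, by rw [Option.some.injEq]; ring⟩
    · -- c = 'I'
        have mA : (w == pre ++ ['A']) = false := pvNeOne hw (by simp)
        have nA : ∀ a : Int, pvGloop d w (pre ++ ['A']) (a, none) = (a + pvT d, none) := fun a => pvNoneDeep d hw (by decide) a
        have mE : (w == pre ++ ['E']) = false := pvNeOne hw (by simp)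
        have nE : ∀ a : Int, pvGloop d w (pre ++ ['E']) (a, none) = (a + pvT d, none) := fun a => pvNoneDeep d hw (by decide) a
        cases rest with
        | nil =>
          have tc : (w == pre ++ ['I']) = true := beq_iff_eq.mpr (by rw [hw])
          simp only [pvGloop, pvRange5, List.foldl_cons, List.foldl_nil, hA, hE, hI, hO, hU, mA, mE, nA, nE, tc, Bool.false_eq_true, if_false, if_true]
          rw [show pvRkW (pvWs (d + 1)) ['I'] = pvCi 'I' * (pvT d + 1) + 1 + pvRkW (pvWs d) [] from rfl, pvRkW_nil, show pvCi 'I' = 2 from by decide]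
          simp only [Prod.mk.injEq]
          exact ⟨by ring, by rw [Option.some.injEq]; ring⟩
        | cons r1 rs =>
          have mc : (w == pre ++ ['I']) = false := pvNeOne hw (by simp)
          have hit : ∀ a : Int, pvGloop d w (pre ++ ['I']) (a, none) = (a + pvRkW (pvWs d) (r1 :: rs), some (a + pvRkW (pvWs d) (r1 :: rs))) := by
            intro a
            apply ih (pre ++ ['I']) a (r1 :: rs)
              ⟨by simp, by have := hs.2.1; simp at this ⊢; omega,
               fun x hx => hs.2.2 x (by simp at hx ⊢; tauto)⟩
            rw [hw]; simp
          simp only [pvGloop, pvRange5, List.foldl_cons, List.foldl_nil, hA, hE, hI, hO, hU, mA, mE, nA, nE, mc, Bool.false_eq_true, if_false, hit]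
          rw [show pvRkW (pvWs (d + 1)) ('I' :: r1 :: rs) = pvCi 'I' * (pvT d + 1) + 1 + pvRkW (pvWs d) (r1 :: rs) from rfl, show pvCi 'I' = 2 from by decide]
          simp only [Prod.mk.injEq]
          exact ⟨by ring, by rw [Option.some.injEq]; ring⟩
    · -- c = 'O'
        have mA : (w == pre ++ ['A']) = false := pvNeOne hw (by simp)
        have nA : ∀ a : Int, pvGloop d w (pre ++ ['A']) (a, none) = (a + pvT d, none) := fun a => pvNoneDeep d hw (by decide) a
        have mE : (w == pre ++ ['E']) = false := pvNeOne hw (by simp)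
        have nE : ∀ a : Int, pvGloop d w (pre ++ ['E']) (a, none) = (a + pvT d, none) := fun a => pvNoneDeep d hw (by decide) a
        have mI : (w == pre ++ ['I']) = false := pvNeOne hw (by simp)
        have nI : ∀ a : Int, pvGloop d w (pre ++ ['I']) (a, none) = (a + pvT d, none) := fun a => pvNoneDeep d hw (by decide) a
        cases rest with
        | nil =>
          have tc : (w == pre ++ ['O']) = true := beq_iff_eq.mpr (by rw [hw])
          simp only [pvGloop, pvRange5, List.foldl_cons, List.foldl_nil, hA, hE, hI, hO, hU, mA, mE, mI, nA, nE, nI, tc, Bool.false_eq_true, if_false, if_true]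
          rw [show pvRkW (pvWs (d + 1)) ['O'] = pvCi 'O' * (pvT d + 1) + 1 + pvRkW (pvWs d) [] from rfl, pvRkW_nil, show pvCi 'O' = 3 from by decide]
          simp only [Prod.mk.injEq]
          exact ⟨by ring, by rw [Option.some.injEq]; ring⟩
        | cons r1 rs =>
          have mc : (w == pre ++ ['O']) = false := pvNeOne hw (by simp)
          have hit : ∀ a : Int, pvGloop d w (pre ++ ['O']) (a, none) = (a + pvRkW (pvWs d) (r1 :: rs), some (a + pvRkW (pvWs d) (r1 :: rs))) := by
            intro a
            apply ih (pre ++ ['O']) a (r1 :: rs)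
              ⟨by simp, by have := hs.2.1; simp at this ⊢; omega,
               fun x hx => hs.2.2 x (by simp at hx ⊢; tauto)⟩
            rw [hw]; simp
          simp only [pvGloop, pvRange5, List.foldl_cons, List.foldl_nil, hA, hE, hI, hO, hU, mA, mE, mI, nA, nE, nI, mc, Bool.false_eq_true, if_false, hit]
          rw [show pvRkW (pvWs (d + 1)) ('O' :: r1 :: rs) = pvCi 'O' * (pvT d + 1) + 1 + pvRkW (pvWs d) (r1 :: rs) from rfl, show pvCi 'O' = 3 from by decide]
          simp only [Prod.mk.injEq]
          exact ⟨by ring, by rw [Option.some.injEq]; ring⟩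
    · -- c = 'U'
        have mA : (w == pre ++ ['A']) = false := pvNeOne hw (by simp)
        have nA : ∀ a : Int, pvGloop d w (pre ++ ['A']) (a, none) = (a + pvT d, none) := fun a => pvNoneDeep d hw (by decide) a
        have mE : (w == pre ++ ['E']) = false := pvNeOne hw (by simp)
        have nE : ∀ a : Int, pvGloop d w (pre ++ ['E']) (a, none) = (a + pvT d, none) := fun a => pvNoneDeep d hw (by decide) a
        have mI : (w == pre ++ ['I']) = false := pvNeOne hw (by simp)
        have nI : ∀ a : Int, pvGloop d w (pre ++ ['I']) (a, none) = (a + pvT d, none) := fun a => pvNoneDeep d hw (by decide) a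
        have mO : (w == pre ++ ['O']) = false := pvNeOne hw (by simp)
        have nO : ∀ a : Int, pvGloop d w (pre ++ ['O']) (a, none) = (a + pvT d, none) := fun a => pvNoneDeep d hw (by decide) a
        cases rest with
        | nil =>
          have tc : (w == pre ++ ['U']) = true := beq_iff_eq.mpr (by rw [hw])
          simp only [pvGloop, pvRange5, List.foldl_cons, List.foldl_nil, hA, hE, hI, hO, hU, mA, mE, mI, mO, nA, nE, nI, nO, tc, Bool.false_eq_true, if_false, if_true]
          rw [show pvRkW (pvWs (d + 1)) ['U'] = pvCi 'U' * (pvT d + 1) + 1 + pvRkW (pvWs d) [] from rfl, pvRkW_nil, show pvCi 'U' = 4 from by decide]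
          simp only [Prod.mk.injEq]
          exact ⟨by ring, by rw [Option.some.injEq]; ring⟩
        | cons r1 rs =>
          have mc : (w == pre ++ ['U']) = false := pvNeOne hw (by simp)
          have hit : ∀ a : Int, pvGloop d w (pre ++ ['U']) (a, none) = (a + pvRkW (pvWs d) (r1 :: rs), some (a + pvRkW (pvWs d) (r1 :: rs))) := by
            intro a
            apply ih (pre ++ ['U']) a (r1 :: rs)
              ⟨by simp, by have := hs.2.1; simp at this ⊢; omega,
               fun x hx => hs.2.2 x (by simp at hx ⊢; tauto)⟩
            rw [hw]; simp
          simp only [pvGloop, pvRange5, List.foldl_cons, List.foldl_nil, hA, hE, hI, hO, hU, mA, mE, mI, mO, nA, nE, nI, nO, mc, Bool.false_eq_true, if_false, hit]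
          rw [show pvRkW (pvWs (d + 1)) ('U' :: r1 :: rs) = pvCi 'U' * (pvT d + 1) + 1 + pvRkW (pvWs d) (r1 :: rs) from rfl, show pvCi 'U' = 4 from by decide]
          simp only [Prod.mk.injEq]
          exact ⟨by ring, by rw [Option.some.injEq]; ring⟩

theorem pvB_closed (word : String) (h : word.toList.length ≤ 5) :
    solution_alt word = pvRkW [781, 156, 31, 6, 1] word.toList := by
  have g0 : ((PySem.List.pyGet? ([781, 156, 31, 6, 1] : List Int) 0).getD 0) = 781 := by decide
  have g1 : ((PySem.List.pyGet? ([781, 156, 31, 6, 1] : List Int) 1).getD 0) = 156 := by decide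
  have g2 : ((PySem.List.pyGet? ([781, 156, 31, 6, 1] : List Int) 2).getD 0) = 31 := by decide
  have g3 : ((PySem.List.pyGet? ([781, 156, 31, 6, 1] : List Int) 3).getD 0) = 6 := by decide
  have g4 : ((PySem.List.pyGet? ([781, 156, 31, 6, 1] : List Int) 4).getD 0) = 1 := by decide
  unfold solution_alt
  rcases hx : word.toList with _ | ⟨a, _ | ⟨b, _ | ⟨c, _ | ⟨d, _ | ⟨e, _ | ⟨f, t⟩⟩⟩⟩⟩⟩ <;>
    rw [hx] at h <;> simp only [List.length] at h <;> try omega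
  · rfl
  · simp only [PySem.List.enumerate_cons, PySem.List.enumerate_nil, List.foldl_cons,
      List.foldl_nil, pvRkW, pvCi, pvVs]
    norm_num [g0]
    try simp only [show Int.toNat 2 = 2 from rfl, show Int.toNat 3 = 3 from rfl, show Int.toNat 4 = 4 from rfl, List.getElem_cons_succ, List.getElem_cons_zero]
    try ring
  · simp only [PySem.List.enumerate_cons, PySem.List.enumerate_nil, List.foldl_cons,
      List.foldl_nil, pvRkW, pvCi, pvVs]
    norm_num [g0, g1]
    try simp only [show Int.toNat 2 = 2 from rfl, show Int.toNat 3 = 3 from rfl, show Int.toNat 4 = 4 from rfl, List.getElem_cons_succ, List.getElem_cons_zero]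
    try ring
  · simp only [PySem.List.enumerate_cons, PySem.List.enumerate_nil, List.foldl_cons,
      List.foldl_nil, pvRkW, pvCi, pvVs]
    norm_num [g0, g1, g2]
    try simp only [show Int.toNat 2 = 2 from rfl, show Int.toNat 3 = 3 from rfl, show Int.toNat 4 = 4 from rfl, List.getElem_cons_succ, List.getElem_cons_zero]
    try ring
  · simp only [PySem.List.enumerate_cons, PySem.List.enumerate_nil, List.foldl_cons,
      List.foldl_nil, pvRkW, pvCi, pvVs]
    norm_num [g0, g1, g2, g3]
    try simp only [show Int.toNat 2 = 2 from rfl, show Int.toNat 3 = 3 from rfl, show Int.toNat 4 = 4 from rfl, List.getElem_cons_succ, List.getElem_cons_zero]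
    try ring
  · simp only [PySem.List.enumerate_cons, PySem.List.enumerate_nil, List.foldl_cons,
      List.foldl_nil, pvRkW, pvCi, pvVs]
    norm_num [g0, g1, g2, g3, g4]
    try simp only [show Int.toNat 2 = 2 from rfl, show Int.toNat 3 = 3 from rfl, show Int.toNat 4 = 4 from rfl, List.getElem_cons_succ, List.getElem_cons_zero]
    try ring

-- ===== VERDICT (by name: the statement is the Claim_ definition above) =====
theorem solution_spec : Claim_equal_solution := by
  intro word _ hpre
  unfold Spec_solution
  obtain ⟨hne, hlen, hmem⟩ := hpre
  have hmem' : ∀ c ∈ word.toList, c ∈ pvVs := by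
    intro c hcm
    have := List.all_eq_true.mp hmem c hcm
    simpa [pvVs] using this
  have hv : pvValid 5 word.toList := ⟨by
    cases h : word.toList with
    | nil => exact absurd h hne
    | cons a t => simp, hlen, hmem'⟩
  have h1 : solution word = ((pvGloop 5 word.toList [] (0, none)).2).getD 0 := by
    unfold solution; rw [pvLoop1_eq]
  rw [h1, pvGloop_some 5 word.toList [] 0 word.toList hv (by simp),
      pvB_closed word hlen]
  have hw5 : pvWs 5 = [781, 156, 31, 6, 1] := by decide
  rw [hw5]
  simp
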